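-- pv_equiv track=rewrite | github.com/Waime/aerohive-bssid | bssid.py | build_idx_dict
-- ===== SOURCE A (Python) =====
-- def build_idx_dict(colline, dashline):
--     dashes = list(map(lambda x: len(x) + 1, dashline.strip().split(' '))) # maps the dashes line to a list of dash lengths
--     dashes.insert(0, 0) # insert a 0 at the front of the list, necessary to determine the start of the first column
--     col_start_idx = []
--     s = 0
--     for item in dashes: # iterate over the column lengths and replace by running total, this is to determine the start of each column
--         s += item
--         col_start_idx.append(s)
--
--     # creates a list of column names based off the previous list (start of the columns)
--     columns = []
--     for i in range(len(col_start_idx) - 1):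
--         start = col_start_idx[i]
--
--         if (i < len(col_start_idx)):
--             end = col_start_idx[i+1]
--         else:
--             end = len(colline)
--
--         columns.append(colline[start:end].strip())
--
--     columns.append("@@END")
--
--     return dict(zip(columns, col_start_idx))
-- ===== SOURCE B (Python) =====
-- def build_idx_dict(colline, dashline):
--     d = {}
--     start = 0
--     for seg in dashline.strip().split(' '):
--         end = start + len(seg) + 1
--         d[colline[start:end].strip()] = start
--         start = end
--     d['@@END'] = start
--     return d
-- ===== Notes on version B (the rewrite author's own statement) =====
-- stated objective: simpler
-- what changed: B fuses A's three passes (building the prefix-sum start-index list, the index-driven slicing loop, and dict(zip(...))) into a single pass that keeps a running start index and inserts each (name, start) pair directly into the dict, dropping the intermediate lists entirely.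
import Mathlib
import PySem

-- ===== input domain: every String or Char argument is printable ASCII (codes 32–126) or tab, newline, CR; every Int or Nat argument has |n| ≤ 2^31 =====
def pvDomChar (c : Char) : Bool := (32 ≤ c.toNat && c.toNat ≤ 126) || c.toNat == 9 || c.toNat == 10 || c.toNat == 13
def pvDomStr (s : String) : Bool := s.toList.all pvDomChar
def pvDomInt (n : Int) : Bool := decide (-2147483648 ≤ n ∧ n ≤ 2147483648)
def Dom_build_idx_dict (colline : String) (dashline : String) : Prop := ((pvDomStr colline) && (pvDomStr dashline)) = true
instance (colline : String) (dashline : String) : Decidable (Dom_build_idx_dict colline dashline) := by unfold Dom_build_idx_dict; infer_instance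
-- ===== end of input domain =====

-- B fuses A's three passes (prefix-sum list, slicing loop, dict(zip(...))) into one pass with a
-- running start index that inserts each (name, start) pair directly; objective: simpler.

-- ===== PORT A =====
-- col_start_idx[i] / col_start_idx[i+1]: the loop index i ranges over range(len-1), so both
-- accesses are always in range; pyGetD with default 0 is exact here (no IndexError is reachable).
def build_idx_dict (colline : String) (dashline : String) : List (String × Int) :=
  let dashes := ((PySem.Str.split? (PySem.Str.strip dashline) " ").getD []).map
      (fun x => PySem.Str.len x + 1)
  let dashes := PySem.List.insert dashes 0 0
  let col_start_idx := (dashes.foldl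
      (fun (st : Int × List Int) item => (st.1 + item, st.2 ++ [st.1 + item])) (0, [])).2
  let columns := (PySem.List.pyRange 0 ((col_start_idx.length : Int) - 1)).foldl
      (fun acc i =>
        let start := PySem.List.pyGetD col_start_idx i 0
        let e := if i < (col_start_idx.length : Int)
                 then PySem.List.pyGetD col_start_idx (i + 1) 0
                 else PySem.Str.len colline
        acc ++ [PySem.Str.strip (PySem.Str.slice colline (some start) (some e))]) []
  let columns := columns ++ ["@@END"]
  (PySem.Dict.ofList (columns.zip col_start_idx)).items

-- ===== PORT B =====
def build_idx_dict_alt (colline : String) (dashline : String) : List (String × Int) :=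
  let st := ((PySem.Str.split? (PySem.Str.strip dashline) " ").getD []).foldl
      (fun (st : PySem.Dict String Int × Int) seg =>
        let e := st.2 + PySem.Str.len seg + 1
        (st.1.insert (PySem.Str.strip (PySem.Str.slice colline (some st.2) (some e))) st.2, e))
      (PySem.Dict.empty, 0)
  (st.1.insert "@@END" st.2).items

-- ===== PRECONDITION & SPEC =====
def Spec_build_idx_dict (colline : String) (dashline : String) (out : List (String × Int)) : Prop := out = build_idx_dict_alt colline dashline
instance (colline : String) (dashline : String) (out : List (String × Int)) : Decidable (Spec_build_idx_dict colline dashline out) := by unfold Spec_build_idx_dict; infer_instance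

-- ===== CLAIM (what is proved, stated in full; the proofs are below) =====
def Claim_equal_build_idx_dict : Prop := ∀ (colline : String) (dashline : String), Dom_build_idx_dict colline dashline → Spec_build_idx_dict colline dashline (build_idx_dict colline dashline)

-- ===== LEMMAS AND PROOFS =====

-- running prefix sums of the widths, as A's first loop produces them (without the leading 0)
def pvScan (s : Int) : List Int → List Int
  | [] => []
  | d :: r => (s + d) :: pvScan (s + d) r

-- the column start indices: s, s+w x₁, s+w x₁+w x₂, …  (length = segs.length + 1)
def pvStarts (s : Int) : List String → List Int
  | [] => [s]
  | x :: r => s :: pvStarts (s + PySem.Str.len x + 1) r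

-- the (column name, start index) pairs both programs insert, in order
def pvPairs (colline : String) (s : Int) : List String → List (String × Int)
  | [] => [("@@END", s)]
  | x :: r =>
      (PySem.Str.strip (PySem.Str.slice colline (some s) (some (s + PySem.Str.len x + 1))), s)
        :: pvPairs colline (s + PySem.Str.len x + 1) r

theorem pvScan_foldl (ds : List Int) (s : Int) (acc : List Int) :
    (ds.foldl (fun (st : Int × List Int) item => (st.1 + item, st.2 ++ [st.1 + item])) (s, acc)).2
      = acc ++ pvScan s ds := by
  induction ds generalizing s acc with
  | nil => simp [pvScan]
  | cons d r ih => simp [pvScan, ih]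

theorem pvStarts_eq_scan (segs : List String) (s : Int) :
    pvStarts s segs = s :: pvScan s (segs.map (fun x => PySem.Str.len x + 1)) := by
  induction segs generalizing s with
  | nil => simp [pvStarts, pvScan]
  | cons x r ih =>
    simp only [pvStarts, List.map_cons, pvScan, ih]
    rw [show s + (PySem.Str.len x + 1) = s + PySem.Str.len x + 1 from by ring]

theorem pvStarts_head (s : Int) (segs : List String) :
    pvStarts s segs = s :: (pvStarts s segs).tail := by
  cases segs <;> rfl

theorem pvMapPairNat {β : Type} (g : Int → Int → β) (L : List Int) :
    (List.range (L.length - 1)).map (fun k => g (L.getD k 0) (L.getD (k + 1) 0))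
      = List.zipWith g L L.tail := by
  induction L with
  | nil => simp
  | cons a r ih =>
    cases r with
    | nil => simp
    | cons b r' =>
      simp only [List.length_cons, Nat.add_sub_cancel, List.range_succ_eq_map,
        List.map_cons, List.map_map, List.tail_cons, List.zipWith_cons_cons]
      simp only [List.length_cons, Nat.add_sub_cancel, List.tail_cons] at ih
      congr 1

theorem pvMapPair {β : Type} (g : Int → Int → β) (L : List Int) :
    (PySem.List.pyRange 0 ((L.length : Int) - 1)).map
        (fun i => g (PySem.List.pyGetD L i 0) (PySem.List.pyGetD L (i + 1) 0))
      = List.zipWith g L L.tail := by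
  rw [PySem.List.pyRange_one, List.map_map, ← pvMapPairNat g L]
  have hn : (((L.length : Int) - 1) - 0).toNat = L.length - 1 := by omega
  rw [hn]
  apply List.map_congr_left
  intro k _
  have h1 : ((0 : Int) + (k : Int)) = ((k : Nat) : Int) := by omega
  have h2 : ((k : Nat) : Int) + 1 = (((k + 1 : Nat)) : Int) := by push_cast; ring
  simp only [Function.comp, h1, h2, PySem.List.pyGetD_natCast]

theorem pvZip_pairs (colline : String) (segs : List String) (s : Int) :
    ((List.zipWith (fun a b => PySem.Str.strip (PySem.Str.slice colline (some a) (some b)))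
        (pvStarts s segs) (pvStarts s segs).tail) ++ ["@@END"]).zip (pvStarts s segs)
      = pvPairs colline s segs := by
  induction segs generalizing s with
  | nil => simp [pvStarts, pvPairs]
  | cons x r ih =>
    rw [show pvStarts s (x :: r) = s :: pvStarts (s + PySem.Str.len x + 1) r from rfl]
    rw [pvStarts_head (s + PySem.Str.len x + 1) r]
    simp only [List.tail_cons, List.zipWith_cons_cons, List.cons_append, List.zip_cons_cons,
      pvPairs]
    congr 1
    rw [← pvStarts_head]
    exact ih (s + PySem.Str.len x + 1)

theorem pvInsert_zero (xs : List Int) : PySem.List.insert xs 0 0 = 0 :: xs := by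
  simp [PySem.List.insert, PySem.List.sliceIndices]

theorem pvAlt_foldl (colline : String) (segs : List String) (d : PySem.Dict String Int) (s : Int) :
    (segs.foldl
        (fun (st : PySem.Dict String Int × Int) seg =>
          (st.1.insert (PySem.Str.strip (PySem.Str.slice colline (some st.2)
            (some (st.2 + PySem.Str.len seg + 1)))) st.2, st.2 + PySem.Str.len seg + 1))
        (d, s)).1.insert "@@END"
      (segs.foldl
        (fun (st : PySem.Dict String Int × Int) seg =>
          (st.1.insert (PySem.Str.strip (PySem.Str.slice colline (some st.2)
            (some (st.2 + PySem.Str.len seg + 1)))) st.2, st.2 + PySem.Str.len seg + 1))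
        (d, s)).2
      = (pvPairs colline s segs).foldl (fun acc p => acc.insert p.1 p.2) d := by
  induction segs generalizing d s with
  | nil => simp [pvPairs]
  | cons x r ih =>
    simp only [List.foldl_cons, pvPairs]
    exact ih _ _

-- ===== VERDICT (by name: the statement is the Claim_ definition above) =====
set_option maxHeartbeats 1000000 in
theorem build_idx_dict_spec : Claim_equal_build_idx_dict := by
  intro colline dashline _
  simp only [Spec_build_idx_dict, build_idx_dict, build_idx_dict_alt]
  set segs := (PySem.Str.split? (PySem.Str.strip dashline) " ").getD [] with hsegs
  -- A's col_start_idx is pvStarts 0 segs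
  rw [pvInsert_zero]
  have hcsi :
      ((0 :: segs.map (fun x => PySem.Str.len x + 1)).foldl
        (fun (st : Int × List Int) item => (st.1 + item, st.2 ++ [st.1 + item])) (0, [])).2
        = pvStarts 0 segs := by
    rw [pvScan_foldl, pvStarts_eq_scan]
    simp [pvScan]
  rw [hcsi]
  set L := pvStarts 0 segs with hL
  -- A's columns loop is a map over the index range; drop the always-true branch,
  -- then read it as zipWith over consecutive starts
  rw [PySem.List.foldl_append_singleton_eq_map]
  have hcols : (PySem.List.pyRange 0 ((L.length : Int) - 1)).map
      (fun i =>
        PySem.Str.strip (PySem.Str.slice colline (some (PySem.List.pyGetD L i 0))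
          (some (if i < (L.length : Int) then PySem.List.pyGetD L (i + 1) 0
                 else PySem.Str.len colline))))
      = List.zipWith (fun a b => PySem.Str.strip (PySem.Str.slice colline (some a) (some b)))
          L L.tail := by
    rw [← pvMapPair (fun a b => PySem.Str.strip (PySem.Str.slice colline (some a) (some b))) L]
    apply List.map_congr_left
    intro i hi
    have := PySem.List.mem_pyRange_one.mp hi
    have hlt : i < (L.length : Int) := by omega
    rw [if_pos hlt]
  rw [hcols, List.nil_append, hL, pvZip_pairs colline segs 0]
  rw [pvAlt_foldl colline segs PySem.Dict.empty 0]
  rfl
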